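-- pv_equiv track=rewrite | github.com/christianjann/aipm | src/aipm/commands/diff.py | _summarize_fallback
-- ===== SOURCE A (Python) =====
-- def _summarize_fallback(diff: str) -> str:
--     """Fallback summary when Copilot is not available."""
--     lines = diff.split("\n")
--     files_changed: set[str] = set()
--     additions = 0
--     deletions = 0
--
--     for line in lines:
--         if line.startswith("diff --git"):
--             parts = line.split(" b/")
--             if len(parts) > 1:
--                 files_changed.add(parts[1])
--         elif line.startswith("+") and not line.startswith("+++"):
--             additions += 1
--         elif line.startswith("-") and not line.startswith("---"):
--             deletions += 1
--
--     summary_parts = [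
--         "# Staged Changes Summary\n",
--         f"**Files changed:** {len(files_changed)}",
--         f"**Additions:** {additions}",
--         f"**Deletions:** {deletions}\n",
--         "## Files\n",
--     ]
--
--     for f in sorted(files_changed):
--         summary_parts.append(f"- `{f}`")
--
--     # Categorize changes
--     ticket_files = [f for f in files_changed if f.startswith("tickets/")]
--     if ticket_files:
--         summary_parts.append(f"\n## Ticket Updates ({len(ticket_files)} files)\n")
--         for f in sorted(ticket_files):
--             summary_parts.append(f"- `{f}`")
--
--     plan_files = [f for f in files_changed if f in ("milestones.md", "goals.md")]
--     if plan_files: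
--         summary_parts.append("\n## Plan Updates\n")
--         for f in sorted(plan_files):
--             summary_parts.append(f"- `{f}`")
--
--     return "\n".join(summary_parts)
-- ===== SOURCE B (Python) =====
-- def _sections(diff_lines):
--     """Parse the diff into per-file section records (header_or_None, body_lines)."""
--     sections = []
--     for line in diff_lines:
--         if line.startswith("diff --git"):
--             sections.append((line, []))
--         elif sections:
--             sections[-1][1].append(line)
--         else:
--             sections.append((None, [line]))
--     return sections
--
--
-- def _summarize_fallback(diff: str) -> str:
--     """Fallback summary when Copilot is not available."""
--     sections = _sections(diff.split("\n"))
--     headers = [h for h, _ in sections if h is not None]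
--     bodies = [l for _, body in sections for l in body]
--     additions = sum(l.startswith("+") and not l.startswith("+++") for l in bodies)
--     deletions = sum(l.startswith("-") and not l.startswith("---") for l in bodies)
--     files = sorted({parts[1]
--                     for parts in (h.split(" b/") for h in headers)
--                     if len(parts) > 1})
--     out = [
--         "# Staged Changes Summary\n",
--         f"**Files changed:** {len(files)}",
--         f"**Additions:** {additions}",
--         f"**Deletions:** {deletions}\n",
--         "## Files\n",
--     ]
--     out += [f"- `{f}`" for f in files]
--     tickets = [f for f in files if f.startswith("tickets/")]
--     if tickets:
--         out.append(f"\n## Ticket Updates ({len(tickets)} files)\n")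
--         out += [f"- `{f}`" for f in tickets]
--     plans = [f for f in files if f in ("milestones.md", "goals.md")]
--     if plans:
--         out.append("\n## Plan Updates\n")
--         out += [f"- `{f}`" for f in plans]
--     return "\n".join(out)
-- ===== Notes on version B (the rewrite author's own statement) =====
-- stated objective: alternative
-- what changed: Replaces A's single flat classify-and-count loop (an elif chain maintaining a set and two counters, then re-sorting each filtered subset) with a parse-then-aggregate design: the diff is first parsed into a list of per-file section records (header, body lines), the aggregates are then computed declaratively over that parsed structure (headers pipeline for the file set, counts over the concatenated bodies), and the report sections are derived by filtering the once-sorted file list instead of sorting each subset.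
import Mathlib
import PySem

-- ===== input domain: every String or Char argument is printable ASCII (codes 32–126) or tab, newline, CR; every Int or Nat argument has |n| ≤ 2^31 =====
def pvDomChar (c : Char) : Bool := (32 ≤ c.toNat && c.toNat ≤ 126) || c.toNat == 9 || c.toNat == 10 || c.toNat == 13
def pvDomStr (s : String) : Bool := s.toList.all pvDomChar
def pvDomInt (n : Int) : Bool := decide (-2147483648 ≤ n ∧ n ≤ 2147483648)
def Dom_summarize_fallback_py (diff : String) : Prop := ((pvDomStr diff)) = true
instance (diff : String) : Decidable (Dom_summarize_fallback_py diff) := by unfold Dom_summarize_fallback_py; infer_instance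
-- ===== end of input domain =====

-- B parses the diff into per-file section records (header, body) first and then aggregates
-- declaratively over that parsed structure, instead of A's single flat classify-and-count loop
-- with per-section re-sorts; objective: alternative decomposition, same output.


-- ===== PORT A =====
-- A's loop body as a named helper (the elif chain, in source order)
def pvStepA (st : PySem.Set String × Nat × Nat) (line : String) : PySem.Set String × Nat × Nat :=
  if PySem.Str.startswith line "diff --git" then
    let parts := (PySem.Str.split? line " b/").getD []
    if parts.length > 1 then (PySem.Set.add st.1 (parts.getD 1 ""), st.2.1, st.2.2)
    else st
  else if PySem.Str.startswith line "+" && !PySem.Str.startswith line "+++" then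
    (st.1, st.2.1 + 1, st.2.2)
  else if PySem.Str.startswith line "-" && !PySem.Str.startswith line "---" then
    (st.1, st.2.1, st.2.2 + 1)
  else st

def summarize_fallback_py (diff : String) : String :=
  let lines := (PySem.Str.split? diff "\n").getD []
  let st := lines.foldl pvStepA (PySem.Set.empty, 0, 0)
  let files_changed := st.1
  let additions := st.2.1
  let deletions := st.2.2
  let summary_parts : List String :=
    ["# Staged Changes Summary\n",
     "**Files changed:** " ++ PySem.Int.toStr (Int.ofNat files_changed.length),
     "**Additions:** " ++ PySem.Int.toStr (Int.ofNat additions),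
     "**Deletions:** " ++ PySem.Int.toStr (Int.ofNat deletions) ++ "\n",
     "## Files\n"]
  let summary_parts := summary_parts ++
    (PySem.List.sorted files_changed (fun x => x) false).map (fun f => "- `" ++ f ++ "`")
  let ticket_files := files_changed.filter (fun f => PySem.Str.startswith f "tickets/")
  let summary_parts := if ticket_files.isEmpty then summary_parts else
    summary_parts ++ ("\n## Ticket Updates (" ++ PySem.Int.toStr (Int.ofNat ticket_files.length) ++ " files)\n") ::
      (PySem.List.sorted ticket_files (fun x => x) false).map (fun f => "- `" ++ f ++ "`")
  let plan_files := files_changed.filter (fun f => f == "milestones.md" || f == "goals.md")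
  let summary_parts := if plan_files.isEmpty then summary_parts else
    summary_parts ++ "\n## Plan Updates\n" ::
      (PySem.List.sorted plan_files (fun x => x) false).map (fun f => "- `" ++ f ++ "`")
  PySem.Str.join "\n" summary_parts

-- ===== PORT B =====
-- _sections' loop body: open a section per "diff --git" line, append other lines to the
-- last section's body (the Python mutates the last record's body list; ported as
-- dropLast ++ [updated record]), headerless preamble record when nothing is open yet
def pvSecStep (secs : List (Option String × List String)) (line : String) :
    List (Option String × List String) :=
  if PySem.Str.startswith line "diff --git" then
    secs ++ [(some line, [])]
  else
    match secs.getLast? with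
    | some last => secs.dropLast ++ [(last.1, last.2 ++ [line])]
    | none => [(none, [line])]

def summarize_fallback_py_alt (diff : String) : String :=
  let sections := ((PySem.Str.split? diff "\n").getD []).foldl pvSecStep []
  let headers := sections.filterMap (fun s => s.1)
  let bodies := sections.flatMap (fun s => s.2)
  let additions := bodies.countP (fun l => PySem.Str.startswith l "+" && !PySem.Str.startswith l "+++")
  let deletions := bodies.countP (fun l => PySem.Str.startswith l "-" && !PySem.Str.startswith l "---")
  let files := PySem.List.sorted
    (PySem.Set.ofList
      (((headers.map (fun h => (PySem.Str.split? h " b/").getD [])).filter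
          (fun p => p.length > 1)).map (fun p => p.getD 1 "")))
    (fun x => x) false
  let out : List String :=
    ["# Staged Changes Summary\n",
     "**Files changed:** " ++ PySem.Int.toStr (Int.ofNat files.length),
     "**Additions:** " ++ PySem.Int.toStr (Int.ofNat additions),
     "**Deletions:** " ++ PySem.Int.toStr (Int.ofNat deletions) ++ "\n",
     "## Files\n"]
  let out := out ++ files.map (fun f => "- `" ++ f ++ "`")
  let tickets := files.filter (fun f => PySem.Str.startswith f "tickets/")
  let out := if tickets.isEmpty then out else
    out ++ ("\n## Ticket Updates (" ++ PySem.Int.toStr (Int.ofNat tickets.length) ++ " files)\n") ::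
      tickets.map (fun f => "- `" ++ f ++ "`")
  let plans := files.filter (fun f => f == "milestones.md" || f == "goals.md")
  let out := if plans.isEmpty then out else
    out ++ "\n## Plan Updates\n" :: plans.map (fun f => "- `" ++ f ++ "`")
  PySem.Str.join "\n" out

-- ===== PRECONDITION & SPEC =====
def Spec_summarize_fallback_py (diff : String) (out : String) : Prop := out = summarize_fallback_py_alt diff
instance (diff : String) (out : String) : Decidable (Spec_summarize_fallback_py diff out) := by unfold Spec_summarize_fallback_py; infer_instance

-- ===== CLAIM (what is proved, stated in full; the proofs are below) =====
def Claim_equal_summarize_fallback_py : Prop := ∀ (diff : String), Dom_summarize_fallback_py diff → Spec_summarize_fallback_py diff (summarize_fallback_py diff)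

-- ===== LEMMAS AND PROOFS =====

-- the candidate file names a line list contributes (used to characterise both ports)
def pvCands (lines : List String) : List String :=
  (((lines.filter (fun l => PySem.Str.startswith l "diff --git")).map
      (fun l => (PySem.Str.split? l " b/").getD [])).filter (fun p => p.length > 1)).map
    (fun p => p.getD 1 "")

-- a string starting with "diff --git" starts with 'd', hence not with "+" or "-"
lemma pv_head_of_startswith {l : List Char} {c : Char} {p : List Char}
    (h : PySem.Chars.startswith l (c :: p) = true) : ∃ t, l = c :: t := by
  rcases (PySem.Chars.startswith_iff l (c :: p)).mp h with ⟨t, ht⟩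
  exact ⟨p ++ t, by simpa using ht.symm⟩

lemma pv_git_excl (l : String) (hg : PySem.Str.startswith l "diff --git" = true) :
    PySem.Str.startswith l "+" = false ∧ PySem.Str.startswith l "-" = false := by
  simp only [PySem.Str.startswith_eq] at hg ⊢
  rcases pv_head_of_startswith (p := "iff --git".toList) (by simpa using hg) with ⟨t, ht⟩
  constructor <;>
  · refine Bool.eq_false_iff.mpr (fun h => ?_)
    rcases pv_head_of_startswith (p := ([] : List Char)) (by simpa using h) with ⟨t', ht'⟩
    rw [ht] at ht'
    simp at ht'

lemma pv_plus_minus_excl (l : String) (hp : PySem.Str.startswith l "+" = true) :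
    PySem.Str.startswith l "-" = false := by
  simp only [PySem.Str.startswith_eq] at hp ⊢
  rcases pv_head_of_startswith (p := ([] : List Char)) (by simpa using hp) with ⟨t, ht⟩
  refine Bool.eq_false_iff.mpr (fun h => ?_)
  rcases pv_head_of_startswith (p := ([] : List Char)) (by simpa using h) with ⟨t', ht'⟩
  rw [ht] at ht'
  simp at ht'

-- loop invariant: A's single fold computes the three aggregates in closed form
lemma pv_fold_eq (lines : List String) : ∀ (s : PySem.Set String) (a d : Nat),
    lines.foldl pvStepA (s, a, d) =
      (PySem.Set.update s (pvCands lines),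
       a + lines.countP (fun l => PySem.Str.startswith l "+" && !PySem.Str.startswith l "+++"),
       d + lines.countP (fun l => PySem.Str.startswith l "-" && !PySem.Str.startswith l "---")) := by
  induction lines with
  | nil => intro s a d; simp [pvCands, PySem.Set.update_nil]
  | cons l rest ih =>
    intro s a d
    by_cases hg : PySem.Str.startswith l "diff --git" = true
    · obtain ⟨hp, hm⟩ := pv_git_excl l hg
      by_cases hlen : ((PySem.Str.split? l " b/").getD []).length > 1
      · simp only [List.foldl_cons, pvStepA, hg, if_pos hlen, if_true, ih]
        simp [PySem.Str.startswith_eq] at hg hp hm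
        simp [pvCands, hp, hm]
        rw [List.filter_cons_of_pos (by simpa using hg), List.map_cons,
            List.filter_cons_of_pos (by simpa using hlen), List.map_cons, PySem.Set.update_cons]
      · simp only [List.foldl_cons, pvStepA, hg, if_neg hlen, if_true, ih]
        simp [PySem.Str.startswith_eq] at hg hp hm
        simp [pvCands, hp, hm]
        rw [List.filter_cons_of_pos (by simpa using hg), List.map_cons,
            List.filter_cons_of_neg (by simpa using hlen)]
    · replace hg : PySem.Str.startswith l "diff --git" = false := by simpa using hg
      by_cases ha : (PySem.Str.startswith l "+" && !PySem.Str.startswith l "+++") = true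
      · have hp : PySem.Str.startswith l "+" = true := (Bool.and_eq_true_iff.mp ha).1
        have hm : PySem.Str.startswith l "-" = false := pv_plus_minus_excl l hp
        simp only [List.foldl_cons, pvStepA, hg, ha, if_true, Bool.false_eq_true, if_false, ih]
        simp [PySem.Str.startswith_eq] at hg ha hm
        simp [pvCands, ha, hm]
        exact ⟨by rw [List.filter_cons_of_neg (by simp [hg])], by omega⟩
      · replace ha : (PySem.Str.startswith l "+" && !PySem.Str.startswith l "+++") = false := by
          simpa using ha
        by_cases hd : (PySem.Str.startswith l "-" && !PySem.Str.startswith l "---") = true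
        · simp only [List.foldl_cons, pvStepA, hg, ha, hd, if_true, Bool.false_eq_true, if_false, ih]
          simp [PySem.Str.startswith_eq] at hg ha hd
          simp [pvCands, List.countP_cons, hd]
          exact ⟨by rw [List.filter_cons_of_neg (by simp [hg])], ha, by omega⟩
        · replace hd : (PySem.Str.startswith l "-" && !PySem.Str.startswith l "---") = false := by
            simpa using hd
          simp only [List.foldl_cons, pvStepA, hg, ha, hd, Bool.false_eq_true, if_false, ih]
          simp [PySem.Str.startswith_eq] at hg ha hd
          simp [pvCands, List.countP_cons]
          exact ⟨by rw [List.filter_cons_of_neg (by simp [hg])], ha, hd⟩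

-- parser invariant: the headers of the parsed sections are exactly the "diff --git" lines,
-- and the concatenated bodies are exactly the remaining lines, in order
lemma pv_sec_inv (lines : List String) : ∀ (secs : List (Option String × List String)),
    (lines.foldl pvSecStep secs).filterMap (fun s => s.1)
      = secs.filterMap (fun s => s.1)
          ++ lines.filter (fun l => PySem.Str.startswith l "diff --git") ∧
    (lines.foldl pvSecStep secs).flatMap (fun s => s.2)
      = secs.flatMap (fun s => s.2)
          ++ lines.filter (fun l => !PySem.Str.startswith l "diff --git") := by
  induction lines with
  | nil => intro secs; simp
  | cons l rest ih =>
    intro secs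
    by_cases hg : PySem.Str.startswith l "diff --git" = true
    · obtain ⟨ih1, ih2⟩ := ih (secs ++ [(some l, [])])
      simp only [List.foldl_cons, pvSecStep, hg, if_true]
      rw [List.filter_cons_of_pos (p := fun s => PySem.Str.startswith s "diff --git") hg,
          List.filter_cons_of_neg (p := fun s => !PySem.Str.startswith s "diff --git")
            (by simp only [hg, Bool.not_true]; exact Bool.false_ne_true)]
      constructor
      · rw [ih1]; simp
      · rw [ih2]; simp
    · replace hg : PySem.Str.startswith l "diff --git" = false := by simpa using hg
      rw [List.filter_cons_of_neg (p := fun s => PySem.Str.startswith s "diff --git")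
            (by simp only [hg]; exact Bool.false_ne_true),
          List.filter_cons_of_pos (p := fun s => !PySem.Str.startswith s "diff --git")
            (by simp only [hg, Bool.not_false])]
      cases hlast : secs.getLast? with
      | none =>
        have hnil : secs = [] := List.getLast?_eq_none_iff.mp hlast
        subst hnil
        obtain ⟨ih1, ih2⟩ := ih [(none, [l])]
        simp only [List.foldl_cons, pvSecStep, hg, Bool.false_eq_true, if_false,
          List.getLast?_nil]
        exact ⟨by rw [ih1]; simp, by rw [ih2]; simp⟩
      | some last =>
        rcases List.getLast?_eq_some_iff.mp hlast with ⟨ys, hys⟩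
        subst hys
        obtain ⟨h0, b0⟩ := last
        obtain ⟨ih1, ih2⟩ := ih (ys ++ [(h0, b0 ++ [l])])
        simp only [List.foldl_cons, pvSecStep, hg, Bool.false_eq_true, if_false, hlast,
          List.dropLast_concat]
        constructor
        · rw [ih1]; cases h0 <;> simp
        · rw [ih2]; simp

-- sorting a filtered subset of a set = filtering the sorted set
lemma pv_sorted_filter (xs : List String) (p : String → Bool) :
    PySem.List.sorted ((PySem.Set.ofList xs).filter p) (fun x => x) false
      = (PySem.List.sorted (PySem.Set.ofList xs) (fun x => x) false).filter p := by
  apply PySem.List.sorted_eq_of_perm_of_pairwise_lt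
  · exact (PySem.List.sorted_perm _ _ _).filter p
  · exact (PySem.List.sorted_ofList_pairwise_lt xs).sublist List.filter_sublist

-- counting +/- lines over the non-header lines = counting them over all lines
lemma pv_countP_nonheader (lines : List String) (p : String → Bool)
    (h : ∀ l, PySem.Str.startswith l "diff --git" = true → p l = false) :
    (lines.filter (fun l => !PySem.Str.startswith l "diff --git")).countP p
      = lines.countP p := by
  rw [List.countP_filter]
  apply List.countP_congr
  intro l _
  by_cases hg : PySem.Str.startswith l "diff --git" = true
  · rw [h l hg]; rfl
  · replace hg : PySem.Str.startswith l "diff --git" = false := by simpa using hg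
    rw [hg]; simp

-- B's header pipeline over the header lines is A's candidate list
lemma pv_cands_headers (lines : List String) :
    ((((lines.filter (fun l => PySem.Str.startswith l "diff --git")).map
        (fun h => (PySem.Str.split? h " b/").getD [])).filter
          (fun p => p.length > 1)).map (fun p => p.getD 1 "")) = pvCands lines := rfl

-- ===== VERDICT (by name: the statement is the Claim_ definition above) =====
theorem summarize_fallback_py_spec : Claim_equal_summarize_fallback_py := by
  intro diff _
  unfold Spec_summarize_fallback_py summarize_fallback_py summarize_fallback_py_alt
  obtain ⟨h1, h2⟩ := pv_sec_inv ((PySem.Str.split? diff "\n").getD []) []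
  simp only [List.filterMap_nil, List.flatMap_nil, List.nil_append] at h1 h2
  have hc1 := pv_countP_nonheader ((PySem.Str.split? diff "\n").getD [])
    (fun l => PySem.Str.startswith l "+" && !PySem.Str.startswith l "+++")
    (fun l hg => by simp only [(pv_git_excl l hg).1, Bool.false_and])
  have hc2 := pv_countP_nonheader ((PySem.Str.split? diff "\n").getD [])
    (fun l => PySem.Str.startswith l "-" && !PySem.Str.startswith l "---")
    (fun l hg => by simp only [(pv_git_excl l hg).2, Bool.false_and])
  simp only [pv_fold_eq, PySem.Set.update_empty, h1, h2, hc1, hc2, pv_cands_headers]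
  have hemp : ∀ xs : List String, (PySem.List.sorted xs (fun x => x) false).isEmpty = xs.isEmpty := by
    intro xs
    rcases hx : PySem.List.sorted xs (fun x => x) false with _ | _
    · rw [(PySem.List.sorted_eq_nil_iff xs (fun x => x) false).mp hx]
    · have hxs : xs ≠ [] := by
        intro h
        subst h
        rw [(PySem.List.sorted_eq_nil_iff [] (fun x => x) false).mpr rfl] at hx
        simp at hx
      simp [hxs]
  rw [← pv_sorted_filter (pvCands ((PySem.Str.split? diff "\n").getD [])) (fun f => PySem.Str.startswith f "tickets/"),
      ← pv_sorted_filter (pvCands ((PySem.Str.split? diff "\n").getD [])) (fun f => f == "milestones.md" || f == "goals.md")]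
  simp only [Nat.zero_add, hemp, PySem.List.length_sorted]
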